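-- pv_equiv track=rewrite | github.com/FennexFox/AIFFEL_codingtest | Programmers Lv0/수 조작하기 1.py | solution
-- ===== SOURCE A (Python) =====
-- def solution(n, control):
--     answer = n
--
--     for input in control:
--         if input == "w":
--             answer += 1
--         elif input == "s":
--             answer -= 1
--         elif input == "d":
--             answer += 10
--         elif input == "a":
--             answer -= 10
--
--     return answer
-- ===== SOURCE B (Python) =====
-- def solution(n, control):
--     return (n + control.count("w") - control.count("s")
--               + 10 * control.count("d") - 10 * control.count("a"))
-- ===== Notes on version B (the rewrite author's own statement) =====
-- stated objective: simpler
-- what changed: Replaced the per-character branch-dispatch accumulation loop by a closed-form arithmetic expression over four str.count character counts.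
import Mathlib
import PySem

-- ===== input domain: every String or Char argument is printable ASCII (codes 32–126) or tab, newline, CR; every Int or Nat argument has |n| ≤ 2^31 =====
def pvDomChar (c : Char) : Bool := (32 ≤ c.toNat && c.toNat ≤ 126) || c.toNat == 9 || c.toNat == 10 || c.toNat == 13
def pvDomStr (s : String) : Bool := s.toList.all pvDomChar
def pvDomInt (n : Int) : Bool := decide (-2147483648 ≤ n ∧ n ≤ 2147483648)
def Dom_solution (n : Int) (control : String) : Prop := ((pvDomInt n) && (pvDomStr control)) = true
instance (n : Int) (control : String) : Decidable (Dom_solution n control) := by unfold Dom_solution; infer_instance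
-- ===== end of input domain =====

-- B replaces A's accumulating branch-dispatch loop by a closed-form expression over four character counts (objective: simpler).

-- ===== PORT A =====
def solution (n : Int) (control : String) : Int :=
  control.toList.foldl
    (fun answer input =>
      if input = 'w' then answer + 1
      else if input = 's' then answer - 1
      else if input = 'd' then answer + 10
      else if input = 'a' then answer - 10
      else answer) n

-- ===== PORT B =====
def solution_alt (n : Int) (control : String) : Int :=
  n + (PySem.Str.count control "w" : Int) - (PySem.Str.count control "s" : Int)
    + 10 * (PySem.Str.count control "d" : Int) - 10 * (PySem.Str.count control "a" : Int)

-- ===== PRECONDITION & SPEC =====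
def Spec_solution (n : Int) (control : String) (out : Int) : Prop := out = solution_alt n control
instance (n : Int) (control : String) (out : Int) : Decidable (Spec_solution n control out) := by unfold Spec_solution; infer_instance

-- ===== CLAIM (what is proved, stated in full; the proofs are below) =====
def Claim_equal_solution : Prop := ∀ (n : Int) (control : String), Dom_solution n control → Spec_solution n control (solution n control)

-- ===== LEMMAS AND PROOFS =====
theorem pv_go_single (c : Char) (l : List Char) : ∀ (fuel acc : Nat), l.length ≤ fuel →
    PySem.Chars.count.go [c] fuel l acc = acc + l.count c := by
  induction l with
  | nil => intro fuel acc _; cases fuel <;> simp [PySem.Chars.count.go]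
  | cons x xs ih =>
    intro fuel acc h
    cases fuel with
    | zero => simp at h
    | succ f =>
      simp only [PySem.Chars.count.go]
      by_cases hx : x = c
      · simp [hx, List.isPrefixOf, ih f (acc+1) (by simpa using h)]
        omega
      · have hp : ([c].isPrefixOf (x :: xs)) = false := by
          simp [List.isPrefixOf]; intro h'; exact absurd h'.symm hx
        simp [hp, hx, ih f acc (by simpa using h)]

theorem pv_count_singleton (l : List Char) (c : Char) :
    PySem.Chars.count l [c] = l.count c := by
  simp [PySem.Chars.count, pv_go_single c l l.length 0 le_rfl]

theorem pv_loop_eq (l : List Char) (n : Int) :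
    l.foldl
      (fun answer input =>
        if input = 'w' then answer + 1
        else if input = 's' then answer - 1
        else if input = 'd' then answer + 10
        else if input = 'a' then answer - 10
        else answer) n
    = n + (l.count 'w' : Int) - (l.count 's' : Int)
        + 10 * (l.count 'd' : Int) - 10 * (l.count 'a' : Int) := by
  induction l generalizing n with
  | nil => simp
  | cons x xs ih =>
    simp only [List.foldl_cons, List.count_cons, ih]
    by_cases hw : x = 'w' <;> by_cases hs : x = 's' <;> by_cases hd : x = 'd' <;>
      by_cases ha : x = 'a' <;> simp_all <;> ring

-- ===== VERDICT (by name: the statement is the Claim_ definition above) =====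
theorem solution_spec : Claim_equal_solution := by
  intro n control _
  unfold Spec_solution solution solution_alt
  simp only [PySem.Str.count_eq]
  have hw : "w".toList = ['w'] := rfl
  have hs : "s".toList = ['s'] := rfl
  have hd : "d".toList = ['d'] := rfl
  have ha : "a".toList = ['a'] := rfl
  rw [hw, hs, hd, ha, pv_count_singleton, pv_count_singleton, pv_count_singleton,
    pv_count_singleton, pv_loop_eq]
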